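-- pv_equiv track=rewrite | github.com/klosoter/Sub-Five | backend/engine/rl/trainer.py | _find_bot_action
-- ===== SOURCE A (Python) =====
-- def _find_bot_action(valid_actions, bot_cards, bot_draw, bot_end, player):
--     """Find the action index matching the bot's choice. Fallback to 0."""
--     bot_card_set = frozenset(bot_cards)
--
--     for i, (cards, draw, end) in enumerate(valid_actions):
--         if end and bot_end:
--             return i
--         if not end and not bot_end:
--             if frozenset(cards) == bot_card_set and draw == bot_draw:
--                 return i
--
--     # Fuzzy: same cards, any draw
--     for i, (cards, draw, end) in enumerate(valid_actions):
--         if not end and not bot_end and frozenset(cards) == bot_card_set: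
--             return i
--
--     # Fallback: play first valid action
--     return 0
-- ===== SOURCE B (Python) =====
-- def _find_bot_action(valid_actions, bot_cards, bot_draw, bot_end, player):
--     """Single pass: exact/end matches return immediately; first fuzzy match is only recorded."""
--     bot_card_set = frozenset(bot_cards)
--     fuzzy = None
--     for i, (cards, draw, end) in enumerate(valid_actions):
--         if end:
--             if bot_end:
--                 return i
--         elif not bot_end and frozenset(cards) == bot_card_set:
--             if draw == bot_draw:
--                 return i
--             if fuzzy is None:
--                 fuzzy = i
--     return fuzzy if fuzzy is not None else 0
-- ===== Notes on version B (the rewrite author's own statement) =====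
-- stated objective: simpler
-- what changed: Replaces A's two sequential scans of valid_actions with one pass that returns exact/end matches immediately and only records the first fuzzy (same cards, other draw) index as a fallback.
import Mathlib
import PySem

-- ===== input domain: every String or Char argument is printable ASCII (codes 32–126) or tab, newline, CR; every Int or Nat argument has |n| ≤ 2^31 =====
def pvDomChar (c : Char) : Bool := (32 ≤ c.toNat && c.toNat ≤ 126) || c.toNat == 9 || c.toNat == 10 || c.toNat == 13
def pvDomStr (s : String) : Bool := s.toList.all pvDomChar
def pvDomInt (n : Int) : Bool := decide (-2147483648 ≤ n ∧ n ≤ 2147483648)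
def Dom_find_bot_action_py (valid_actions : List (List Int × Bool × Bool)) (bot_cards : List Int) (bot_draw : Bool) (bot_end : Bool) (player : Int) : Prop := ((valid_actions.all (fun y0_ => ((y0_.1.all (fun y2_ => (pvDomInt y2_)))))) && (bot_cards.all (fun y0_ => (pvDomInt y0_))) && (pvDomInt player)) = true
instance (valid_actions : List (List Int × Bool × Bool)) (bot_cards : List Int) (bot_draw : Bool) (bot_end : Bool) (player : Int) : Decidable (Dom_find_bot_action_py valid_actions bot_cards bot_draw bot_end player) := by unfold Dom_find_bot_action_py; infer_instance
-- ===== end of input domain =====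

-- B merges A's two sequential scans into one pass that records the first fuzzy match
-- instead of rescanning (objective: simpler).

-- ===== PORT A =====
-- first scan of A: end-match or exact (same card set, same draw) match
def fbaLoop1 (bcs : PySem.Set Int) (bd be : Bool) : List (List Int × Bool × Bool) → Int → Option Int
  | [], _ => none
  | (cards, draw, e) :: rest, i =>
    if e && be then some i
    else if !e && !be && PySem.Set.equal (PySem.Set.ofList cards) bcs && (draw == bd) then some i
    else fbaLoop1 bcs bd be rest (i + 1)

-- second scan of A: fuzzy (same card set, any draw) match
def fbaLoop2 (bcs : PySem.Set Int) (be : Bool) : List (List Int × Bool × Bool) → Int → Option Int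
  | [], _ => none
  | (cards, _, e) :: rest, i =>
    if !e && !be && PySem.Set.equal (PySem.Set.ofList cards) bcs then some i
    else fbaLoop2 bcs be rest (i + 1)

def find_bot_action_py (valid_actions : List (List Int × Bool × Bool)) (bot_cards : List Int) (bot_draw : Bool) (bot_end : Bool) (player : Int) : Int :=
  let bcs := PySem.Set.ofList bot_cards
  match fbaLoop1 bcs bot_draw bot_end valid_actions 0 with
  | some i => i
  | none =>
    match fbaLoop2 bcs bot_end valid_actions 0 with
    | some i => i
    | none => 0

-- ===== PORT B =====
-- single pass: return exact/end matches immediately, record the first fuzzy index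
def fbaAltLoop (bcs : PySem.Set Int) (bd be : Bool) : List (List Int × Bool × Bool) → Int → Option Int → Int
  | [], _, fz => fz.getD 0
  | (cards, draw, e) :: rest, i, fz =>
    if e then
      if be then i else fbaAltLoop bcs bd be rest (i + 1) fz
    else if !be && PySem.Set.equal (PySem.Set.ofList cards) bcs then
      if draw == bd then i
      else fbaAltLoop bcs bd be rest (i + 1) (some (fz.getD i))
    else fbaAltLoop bcs bd be rest (i + 1) fz

def find_bot_action_py_alt (valid_actions : List (List Int × Bool × Bool)) (bot_cards : List Int) (bot_draw : Bool) (bot_end : Bool) (player : Int) : Int :=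
  fbaAltLoop (PySem.Set.ofList bot_cards) bot_draw bot_end valid_actions 0 none

-- ===== PRECONDITION & SPEC =====
def Spec_find_bot_action_py (valid_actions : List (List Int × Bool × Bool)) (bot_cards : List Int) (bot_draw : Bool) (bot_end : Bool) (player : Int) (out : Int) : Prop := out = find_bot_action_py_alt valid_actions bot_cards bot_draw bot_end player
instance (valid_actions : List (List Int × Bool × Bool)) (bot_cards : List Int) (bot_draw : Bool) (bot_end : Bool) (player : Int) (out : Int) : Decidable (Spec_find_bot_action_py valid_actions bot_cards bot_draw bot_end player out) := by unfold Spec_find_bot_action_py; infer_instance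

-- ===== CLAIM (what is proved, stated in full; the proofs are below) =====
def Claim_equal_find_bot_action_py : Prop := ∀ (valid_actions : List (List Int × Bool × Bool)) (bot_cards : List Int) (bot_draw : Bool) (bot_end : Bool) (player : Int), Dom_find_bot_action_py valid_actions bot_cards bot_draw bot_end player → Spec_find_bot_action_py valid_actions bot_cards bot_draw bot_end player (find_bot_action_py valid_actions bot_cards bot_draw bot_end player)

-- ===== LEMMAS AND PROOFS =====

-- the one-pass loop equals: first scan 1 hit, else the recorded fuzzy, else first scan 2 hit, else 0
theorem fbaAltLoop_eq (bcs : PySem.Set Int) (bd be : Bool)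
    (l : List (List Int × Bool × Bool)) (i : Int) (fz : Option Int) :
    fbaAltLoop bcs bd be l i fz =
      match fbaLoop1 bcs bd be l i with
      | some j => j
      | none =>
        match fz with
        | some f => f
        | none => match fbaLoop2 bcs be l i with | some j => j | none => 0 := by
  induction l generalizing i fz with
  | nil => cases fz <;> simp [fbaAltLoop, fbaLoop1, fbaLoop2]
  | cons hd tl ih =>
    obtain ⟨cards, draw, e⟩ := hd
    cases e <;> cases be <;>
      cases hEq : PySem.Set.equal (PySem.Set.ofList cards) bcs <;>
      cases hDraw : draw == bd <;> cases fz <;>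
      simp [fbaAltLoop, fbaLoop1, fbaLoop2, hEq, hDraw, ih]

-- ===== VERDICT (by name: the statement is the Claim_ definition above) =====
theorem find_bot_action_py_spec : Claim_equal_find_bot_action_py := by
  intro va bc bd be p _
  unfold Spec_find_bot_action_py find_bot_action_py find_bot_action_py_alt
  rw [fbaAltLoop_eq]
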